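-- pv_equiv track=rewrite | github.com/esaskar/CoReCo | reconstruction_scripts/simple_graph.py | backtrack
-- ===== SOURCE A (Python) =====
-- def backtrack(Erev, nodes):
--     Q = list(nodes)
--     visited = set(nodes)
--     ends = set()
--     edges = {}
--     #print ">> NODES", nodes, " EDGES", Erev
--     while len(Q) > 0:
--         q = Q.pop(0)
--         if q in Erev and len(Erev[q]) > 0:
--             for u in Erev[q]:
--                 if u not in edges:
--                     edges[u] = set()
--                 if q not in edges:
--                     edges[q] = set()
--                 edges[u].add(q)
--                 if u not in visited:
--                     Q.append(u)
--                     visited.add(u)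
--         else:
--             ends.add(q)
--     return ends, edges
-- ===== SOURCE B (Python) =====
-- def backtrack(Erev, nodes):
--     # Pass 1: plain reachability traversal -- compute the processing order
--     # (closure of nodes under Erev), without touching ends/edges.
--     order = []
--     Q = list(nodes)
--     visited = set(nodes)
--     while Q:
--         q = Q.pop(0)
--         order.append(q)
--         for u in Erev.get(q, ()):
--             if u not in visited:
--                 visited.add(u)
--                 Q.append(u)
--     # Pass 2: build sinks and reverse adjacency from the order alone.
--     ends = set()
--     edges = {}
--     for q in order:
--         es = Erev.get(q, ())
--         if len(es) > 0:
--             for u in es: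
--                 edges.setdefault(u, set())
--                 edges.setdefault(q, set())
--                 edges[u].add(q)
--         else:
--             ends.add(q)
--     return ends, edges
-- ===== Notes on version B (the rewrite author's own statement) =====
-- stated objective: alternative
-- what changed: A's single BFS loop that interleaves discovery with sink/adjacency construction is split into two separately-shaped passes: an iterative reachability traversal computing the processing order, then a fold over that order building ends and edges.
import Mathlib
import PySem

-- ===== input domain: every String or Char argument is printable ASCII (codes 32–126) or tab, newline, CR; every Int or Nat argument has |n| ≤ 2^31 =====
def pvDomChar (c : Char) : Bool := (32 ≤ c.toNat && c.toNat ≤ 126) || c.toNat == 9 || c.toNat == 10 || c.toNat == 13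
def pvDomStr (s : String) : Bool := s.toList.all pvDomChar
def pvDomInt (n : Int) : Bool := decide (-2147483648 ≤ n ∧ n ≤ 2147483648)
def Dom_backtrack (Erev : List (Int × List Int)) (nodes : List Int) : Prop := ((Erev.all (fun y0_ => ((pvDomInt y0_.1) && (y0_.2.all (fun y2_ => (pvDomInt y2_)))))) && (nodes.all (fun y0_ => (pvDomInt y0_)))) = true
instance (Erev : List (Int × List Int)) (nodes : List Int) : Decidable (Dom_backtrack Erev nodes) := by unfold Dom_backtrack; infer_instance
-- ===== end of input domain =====

-- B restructures A's single interleaved BFS loop into two passes (reachability order first,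
-- then sink/adjacency construction); objective: alternative decomposition, same cost.

-- ===== PORT A =====
-- A's inner `for u in Erev[q]` body: updates edges, the queue tail being appended, and visited.
def backtrackInnerA (q : Int) (s : PySem.Dict Int (PySem.Set Int) × List Int × PySem.Set Int)
    (u : Int) : PySem.Dict Int (PySem.Set Int) × List Int × PySem.Set Int :=
  let ed := s.1.setdefault u PySem.Set.empty            -- if u not in edges: edges[u] = set()
  let ed := ed.setdefault q PySem.Set.empty             -- if q not in edges: edges[q] = set()
  let ed := ed.modify u PySem.Set.empty (fun t => PySem.Set.add t q)   -- edges[u].add(q)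
  if s.2.2.contains u then (ed, s.2.1, s.2.2)
  else (ed, s.2.1 ++ [u], PySem.Set.add s.2.2 u)        -- Q.append(u); visited.add(u)

-- A's `while len(Q) > 0` loop; fuel only makes it total (the caller passes enough).
def backtrackLoopA (E : PySem.Dict Int (List Int)) :
    Nat → List Int → PySem.Set Int → PySem.Set Int → PySem.Dict Int (PySem.Set Int) →
    PySem.Set Int × PySem.Dict Int (PySem.Set Int)
  | 0, _, _, ends, edges => (ends, edges)
  | _ + 1, [], _, ends, edges => (ends, edges)
  | n + 1, q :: rest, visited, ends, edges =>
      if E.contains q && decide (0 < (E.getD q []).length) then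
        let t := (E.getD q []).foldl (backtrackInnerA q) (edges, [], visited)
        backtrackLoopA E n (rest ++ t.2.1) t.2.2 ends t.1
      else
        backtrackLoopA E n rest visited (PySem.Set.add ends q) edges

def backtrack (Erev : List (Int × List Int)) (nodes : List Int) : List Int × (List (Int × List Int)) :=
  let E := PySem.Dict.mk Erev
  let fuel := nodes.length + (Erev.map (fun p => p.2.length)).sum + 1
  let r := backtrackLoopA E fuel nodes (PySem.Set.ofList nodes) PySem.Set.empty PySem.Dict.empty
  (r.1, r.2.items)

-- ===== PORT B =====
-- B pass 1 inner body: queue/visited update only.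
def backtrackInnerQV (s : List Int × PySem.Set Int) (u : Int) : List Int × PySem.Set Int :=
  if s.2.contains u then s else (s.1 ++ [u], PySem.Set.add s.2 u)

-- B pass 1: the processing order (closure of nodes under Erev); fuel only makes it total.
def backtrackReach (E : PySem.Dict Int (List Int)) :
    Nat → List Int → PySem.Set Int → List Int
  | 0, _, _ => []
  | _ + 1, [], _ => []
  | n + 1, q :: rest, visited =>
      let s := (E.getD q []).foldl backtrackInnerQV ([], visited)
      q :: backtrackReach E n (rest ++ s.1) s.2

-- B pass 2 inner body: edges updates only.
def backtrackInnerE (q : Int) (ed : PySem.Dict Int (PySem.Set Int)) (u : Int) :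
    PySem.Dict Int (PySem.Set Int) :=
  ((ed.setdefault u PySem.Set.empty).setdefault q PySem.Set.empty).modify u PySem.Set.empty
    (fun t => PySem.Set.add t q)

-- B pass 2 step for one node of the order.
def backtrackBuildStep (E : PySem.Dict Int (List Int))
    (s : PySem.Set Int × PySem.Dict Int (PySem.Set Int)) (q : Int) :
    PySem.Set Int × PySem.Dict Int (PySem.Set Int) :=
  let es := E.getD q []
  if 0 < es.length then (s.1, es.foldl (backtrackInnerE q) s.2)
  else (PySem.Set.add s.1 q, s.2)

def backtrack_alt (Erev : List (Int × List Int)) (nodes : List Int) : List Int × (List (Int × List Int)) :=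
  let E := PySem.Dict.mk Erev
  let fuel := nodes.length + (Erev.map (fun p => p.2.length)).sum + 1
  let order := backtrackReach E fuel nodes (PySem.Set.ofList nodes)
  let r := order.foldl (backtrackBuildStep E) (PySem.Set.empty, PySem.Dict.empty)
  (r.1, r.2.items)

-- ===== PRECONDITION & SPEC =====
def Spec_backtrack (Erev : List (Int × List Int)) (nodes : List Int) (out : List Int × (List (Int × List Int))) : Prop := out = backtrack_alt Erev nodes
instance (Erev : List (Int × List Int)) (nodes : List Int) (out : List Int × (List (Int × List Int))) : Decidable (Spec_backtrack Erev nodes out) := by unfold Spec_backtrack; infer_instance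

-- ===== CLAIM (what is proved, stated in full; the proofs are below) =====
def Claim_equal_backtrack : Prop := ∀ (Erev : List (Int × List Int)) (nodes : List Int), Dom_backtrack Erev nodes → Spec_backtrack Erev nodes (backtrack Erev nodes)

-- ===== LEMMAS AND PROOFS =====

-- A's combined inner body is the pair of B's two inner bodies.
theorem innerA_eq (q : Int) (s : PySem.Dict Int (PySem.Set Int) × List Int × PySem.Set Int)
    (u : Int) : backtrackInnerA q s u = (backtrackInnerE q s.1 u, backtrackInnerQV s.2 u) := by
  simp only [backtrackInnerA, backtrackInnerE, backtrackInnerQV]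
  split <;> rfl

-- A's inner fold splits into B's two independent folds.
theorem foldl_innerA_split (q : Int) (es : List Int) :
    ∀ (d : PySem.Dict Int (PySem.Set Int)) (nq : List Int) (v : PySem.Set Int),
      es.foldl (backtrackInnerA q) (d, nq, v) =
        (es.foldl (backtrackInnerE q) d, es.foldl backtrackInnerQV (nq, v)) := by
  induction es with
  | nil => intro d nq v; rfl
  | cons a t ih =>
      intro d nq v
      simp only [List.foldl_cons, innerA_eq]
      exact ih _ _ _

-- Interleaved loop = reachability order, then the build fold.
theorem loopA_eq_reach_build (E : PySem.Dict Int (List Int)) :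
    ∀ (n : Nat) (Q : List Int) (v e : PySem.Set Int) (d : PySem.Dict Int (PySem.Set Int)),
      backtrackLoopA E n Q v e d =
        (backtrackReach E n Q v).foldl (backtrackBuildStep E) (e, d) := by
  intro n
  induction n with
  | zero => intro Q v e d; rfl
  | succ n ih =>
      intro Q v e d
      cases Q with
      | nil => rfl
      | cons q rest =>
          by_cases hc : (E.contains q && decide (0 < (E.getD q []).length)) = true
          · have hlen : 0 < (E.getD q []).length := by
              simpa using (Bool.and_eq_true_iff.mp hc).2
            simp only [backtrackLoopA, backtrackReach, hc, if_pos,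
              foldl_innerA_split, List.foldl_cons]
            rw [ih]
            simp [backtrackBuildStep, hlen]
          · have hes : E.getD q [] = [] := by
              by_cases hct : E.contains q = true
              · have hnp : ¬ 0 < (E.getD q []).length := fun h => hc (by simp [hct, h])
                simpa [List.length_eq_zero_iff] using Nat.eq_zero_of_not_pos hnp
              · exact PySem.Dict.getD_of_not_contains E [] (by simpa using hct)
            simp only [backtrackLoopA, backtrackReach, hes, List.foldl_nil,
              List.append_nil, List.foldl_cons]
            rw [if_neg (by simp), ih]
            simp [backtrackBuildStep, hes]

-- ===== VERDICT (by name: the statement is the Claim_ definition above) =====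
theorem backtrack_spec : Claim_equal_backtrack := by
  intro Erev nodes _
  show backtrack Erev nodes = backtrack_alt Erev nodes
  simp only [backtrack, backtrack_alt, loopA_eq_reach_build]
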